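-- pv_equiv track=rewrite | github.com/sxhexe/mechanism-finder | utility.py | smilesToSysCall
-- ===== SOURCE A (Python) =====
-- def smilesToFilename(smiles):
--     fileName = ''
--     for c in smiles:
--         if c == '/':
--             fileName += 'z'
--             continue
--         if c == '\\':
--             fileName += 'x'
--             continue
--         if c == '#':
--             fileName += '^'
--             continue
--         # if c == '(' or c == ')':
--         #     fileName += '\\'
--         fileName += c
--     return fileName
--
-- def smilesToSysCall(smiles):
--     fileName = smilesToFilename(smiles)
--     call = ''
--     for c in fileName:
--         if c == '(' or c == ')' or c == '$':
--             call += '\\'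
--         call += c
--     return call
-- ===== SOURCE B (Python) =====
-- _TABLE = {'/': 'z', '\\': 'x', '#': '^', '(': '\\(', ')': '\\)', '$': '\\$'}
--
-- def smilesToSysCall(smiles):
--     # single pass over the input via one replacement table
--     return ''.join(_TABLE.get(c, c) for c in smiles)
-- ===== Notes on version B (the rewrite author's own statement) =====
-- stated objective: simpler
-- what changed: Replaces the two chained per-character accumulation loops with a single pass that joins table.get(c, c) over one replacement dict covering all six special characters.
import Mathlib
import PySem

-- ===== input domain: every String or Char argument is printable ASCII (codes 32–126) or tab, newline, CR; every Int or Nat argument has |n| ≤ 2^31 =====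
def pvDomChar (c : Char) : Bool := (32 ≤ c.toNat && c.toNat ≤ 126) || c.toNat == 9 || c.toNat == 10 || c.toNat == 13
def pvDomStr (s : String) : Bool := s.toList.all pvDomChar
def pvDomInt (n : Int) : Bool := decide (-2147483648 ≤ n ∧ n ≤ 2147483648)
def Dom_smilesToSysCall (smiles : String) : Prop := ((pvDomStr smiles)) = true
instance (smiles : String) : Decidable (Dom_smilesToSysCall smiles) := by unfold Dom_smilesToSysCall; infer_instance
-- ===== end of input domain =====

-- B fuses A's two sequential character-rewriting passes into one pass over a single replacement table (objective: simpler).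

-- ===== PORT A =====
def smilesToFilenameA (smiles : String) : String :=
  String.ofList (smiles.toList.foldl (fun fileName c =>
    if c = '/' then fileName ++ ['z']
    else if c = '\\' then fileName ++ ['x']
    else if c = '#' then fileName ++ ['^']
    else fileName ++ [c]) [])

def smilesToSysCall (smiles : String) : String :=
  let fileName := smilesToFilenameA smiles
  String.ofList (fileName.toList.foldl (fun call c =>
    if c = '(' ∨ c = ')' ∨ c = '$' then (call ++ ['\\']) ++ [c]
    else call ++ [c]) [])

-- ===== PORT B =====
def pvTable : PySem.Dict Char String :=
  PySem.Dict.ofList [('/', "z"), ('\\', "x"), ('#', "^"), ('(', "\\("), (')', "\\)"), ('$', "\\$")]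

def smilesToSysCall_alt (smiles : String) : String :=
  String.ofList ((smiles.toList.map (fun c => (pvTable.getD c (String.ofList [c])).toList)).flatten)

-- ===== PRECONDITION & SPEC =====
def Spec_smilesToSysCall (smiles : String) (out : String) : Prop := out = smilesToSysCall_alt smiles
instance (smiles : String) (out : String) : Decidable (Spec_smilesToSysCall smiles out) := by unfold Spec_smilesToSysCall; infer_instance

-- ===== CLAIM (what is proved, stated in full; the proofs are below) =====
def Claim_equal_smilesToSysCall : Prop := ∀ (smiles : String), Dom_smilesToSysCall smiles → Spec_smilesToSysCall smiles (smilesToSysCall smiles)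

-- ===== LEMMAS AND PROOFS =====

-- per-character action of A's first pass
def pvG1 (c : Char) : List Char :=
  if c = '/' then ['z'] else if c = '\\' then ['x'] else if c = '#' then ['^'] else [c]

-- per-character action of A's second pass
def pvG2 (c : Char) : List Char :=
  if c = '(' ∨ c = ')' ∨ c = '$' then ['\\', c] else [c]

lemma pvPass1 (l acc : List Char) :
    l.foldl (fun fileName c =>
      if c = '/' then fileName ++ ['z']
      else if c = '\\' then fileName ++ ['x']
      else if c = '#' then fileName ++ ['^']
      else fileName ++ [c]) acc = acc ++ l.flatMap pvG1 := by
  induction l generalizing acc with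
  | nil => simp
  | cons c t ih => simp only [List.foldl_cons, List.flatMap_cons, pvG1]; split_ifs <;>
      rw [ih] <;> simp

lemma pvPass2 (l acc : List Char) :
    l.foldl (fun call c =>
      if c = '(' ∨ c = ')' ∨ c = '$' then (call ++ ['\\']) ++ [c]
      else call ++ [c]) acc = acc ++ l.flatMap pvG2 := by
  induction l generalizing acc with
  | nil => simp
  | cons c t ih => simp only [List.foldl_cons, List.flatMap_cons, pvG2]; split_ifs <;>
      rw [ih] <;> simp

lemma pvTable_eq : pvTable = PySem.Dict.mk
    [('/', "z"), ('\\', "x"), ('#', "^"), ('(', "\\("), (')', "\\)"), ('$', "\\$")] := rfl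

lemma pvCharStep (c : Char) :
    (pvG1 c).flatMap pvG2 = (pvTable.getD c (String.ofList [c])).toList := by
  by_cases h1 : c = '/' <;> by_cases h2 : c = '\\' <;> by_cases h3 : c = '#' <;>
    by_cases h4 : c = '(' <;> by_cases h5 : c = ')' <;> by_cases h6 : c = '$' <;>
    simp_all [pvG1, pvG2, pvTable_eq, PySem.Dict.getD, PySem.Dict.get?_mk_cons] <;>
    split_ifs <;> simp_all [PySem.Dict.get?, @eq_comm Char]

-- ===== VERDICT (by name: the statement is the Claim_ definition above) =====
theorem smilesToSysCall_spec : Claim_equal_smilesToSysCall := by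
  intro smiles _
  unfold Spec_smilesToSysCall smilesToSysCall smilesToSysCall_alt smilesToFilenameA
  simp only [pvPass1, pvPass2, List.nil_append, String.toList_ofList]
  congr 1
  simp only [List.flatMap_assoc]
  induction smiles.toList with
  | nil => rfl
  | cons c t ih => simp only [List.flatMap_cons, List.map_cons, List.flatten_cons, ih, pvCharStep c]
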